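-- pv_equiv track=rewrite | github.com/kelilipan/wedhus | bot.py | remove_mention
-- ===== SOURCE A (Python) =====
-- def remove_mention(text,n):
--     temp = text.partition(' ')[2]
--     if n > 0:
--         for i in range(n):
--             temp = temp.partition(' ')[2]
--         return temp
--     else:
--         return text
-- ===== SOURCE B (Python) =====
-- def remove_mention(text, n):
--     if n <= 0:
--         return text
--     tokens = text.split(' ')
--     return ' '.join(tokens[n+1:])
-- ===== Notes on version B (the rewrite author's own statement) =====
-- stated objective: simpler
-- what changed: B replaces A's n repeated partition(' ') left-to-right scans with a single split(' ') followed by one slice and join (tokens[n+1:]), keeping A's n<=0 pass-through.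
import Mathlib
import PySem

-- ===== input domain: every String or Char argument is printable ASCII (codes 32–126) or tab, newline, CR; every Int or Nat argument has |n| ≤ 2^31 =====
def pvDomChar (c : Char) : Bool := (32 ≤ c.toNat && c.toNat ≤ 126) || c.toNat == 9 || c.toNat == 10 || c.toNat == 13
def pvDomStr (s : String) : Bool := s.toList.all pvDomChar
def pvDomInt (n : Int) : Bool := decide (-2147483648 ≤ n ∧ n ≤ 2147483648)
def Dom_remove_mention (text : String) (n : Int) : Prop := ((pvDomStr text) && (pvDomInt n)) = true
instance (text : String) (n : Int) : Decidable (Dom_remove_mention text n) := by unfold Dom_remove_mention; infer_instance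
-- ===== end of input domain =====

-- B replaces A's n repeated partition(' ') scans with one split(' ') plus a slice-and-join (simpler, same result).

-- ===== PORT A =====
-- partition(' ')[2]: everything after the first ' ', or [] if there is no ' ' (exact for str.partition's third component)
def pvAfterSpace : List Char → List Char
  | [] => []
  | c :: cs => if c = ' ' then cs else pvAfterSpace cs

def remove_mention (text : String) (n : Int) : String :=
  let temp := pvAfterSpace text.toList
  if n > 0 then
    String.ofList ((PySem.List.pyRange 0 n 1).foldl (fun t _ => pvAfterSpace t) temp)
  else text

-- ===== PORT B =====
def remove_mention_alt (text : String) (n : Int) : String :=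
  if n ≤ 0 then text
  else
    let tokens := List.splitOn ' ' text.toList
    String.ofList (PySem.Chars.join [' '] (tokens.drop (n + 1).toNat))

-- ===== PRECONDITION & SPEC =====
def Spec_remove_mention (text : String) (n : Int) (out : String) : Prop := out = remove_mention_alt text n
instance (text : String) (n : Int) (out : String) : Decidable (Spec_remove_mention text n out) := by unfold Spec_remove_mention; infer_instance

-- ===== CLAIM (what is proved, stated in full; the proofs are below) =====
def Claim_equal_remove_mention : Prop := ∀ (text : String) (n : Int), Dom_remove_mention text n → Spec_remove_mention text n (remove_mention text n)

-- ===== LEMMAS AND PROOFS =====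

-- ===== VERDICT (by name: the statement is the Claim_ definition above) =====
lemma pvAfterSpace_of_not_mem (cs : List Char) (h : ' ' ∉ cs) : pvAfterSpace cs = [] := by
  induction cs with
  | nil => rfl
  | cons c cs ih =>
    simp only [List.mem_cons, not_or] at h
    simp [pvAfterSpace, Ne.symm h.1, ih h.2]

lemma splitOn_of_not_mem (cs : List Char) (h : ' ' ∉ cs) : List.splitOn ' ' cs = [cs] := by
  induction cs with
  | nil => rfl
  | cons c cs ih =>
    simp only [List.mem_cons, not_or] at h
    simp only [List.splitOn, List.splitOnP_cons] at *
    rw [if_neg (by simpa using Ne.symm h.1), ih h.2]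
    rfl

lemma splitOn_pvAfterSpace (cs : List Char) (h : ' ' ∈ cs) :
    List.splitOn ' ' (pvAfterSpace cs) = (List.splitOn ' ' cs).tail := by
  induction cs with
  | nil => cases h
  | cons c cs ih =>
    by_cases hc : c = ' '
    · subst hc
      simp [pvAfterSpace, List.splitOn, List.splitOnP_cons]
    · have hmem : ' ' ∈ cs := by
        rcases List.mem_cons.mp h with h' | h'
        · exact absurd (Eq.symm h') hc
        · exact h'
      have hbe : (c == ' ') = false := by simpa using hc
      rw [show pvAfterSpace (c :: cs) = pvAfterSpace cs from by simp [pvAfterSpace, hc],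
        ih hmem]
      show _ = (List.splitOnP (fun a => a == ' ') (c :: cs)).tail
      rw [List.splitOnP_cons, hbe]
      cases hsp : List.splitOnP (fun a => a == ' ') cs with
      | nil => exact absurd hsp (List.splitOnP_ne_nil _ cs)
      | cons t ts => simp [List.splitOn, hsp]

-- iterating pvAfterSpace k times drops the first k space-delimited tokens
lemma iterate_pvAfterSpace (k : Nat) (cs : List Char) :
    pvAfterSpace^[k] cs = PySem.Chars.join [' '] ((List.splitOn ' ' cs).drop k) := by
  induction k generalizing cs with
  | zero =>
    simpa [PySem.Chars.join] using (List.intercalate_splitOn cs ' ').symm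
  | succ k ih =>
    rw [Function.iterate_succ_apply, ih]
    by_cases h : ' ' ∈ cs
    · rw [splitOn_pvAfterSpace cs h, List.drop_tail]
    · rw [pvAfterSpace_of_not_mem cs h, splitOn_of_not_mem cs h]
      cases k with
      | zero => rfl
      | succ k => simp [PySem.Chars.join]

lemma foldl_const_iterate {α β : Type} (f : α → α) (l : List β) (a : α) :
    l.foldl (fun s _ => f s) a = f^[l.length] a := by
  induction l generalizing a with
  | nil => rfl
  | cons x xs ih => simp [List.foldl_cons, ih, Function.iterate_succ_apply]

lemma pyRange_length (n : Int) : (PySem.List.pyRange 0 n 1).length = n.toNat := by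
  simp [PySem.List.pyRange]
  omega

theorem remove_mention_spec : Claim_equal_remove_mention := by
  intro text n _
  unfold Spec_remove_mention remove_mention remove_mention_alt
  by_cases hn : n > 0
  · have hn' : ¬ n ≤ 0 := by omega
    simp only [if_pos hn, if_neg hn']
    rw [foldl_const_iterate, pyRange_length,
      ← Function.iterate_succ_apply pvAfterSpace n.toNat text.toList,
      iterate_pvAfterSpace]
    have h1 : (n + 1).toNat = n.toNat + 1 := by omega
    rw [h1]
  · have hn' : n ≤ 0 := by omega
    simp only [if_neg hn, if_pos hn']
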